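-- pv_equiv track=rewrite | github.com/Satya-Holbox/image_similarity_poc | src/s3_utils.py | detect_folder_from_query
-- ===== SOURCE A (Python) =====
-- def detect_folder_from_query(query, known_folder_names):
--     query_lower = query.lower()
--     query_tokens = [token.strip(".,?!;").lower() for token in query.split()]
--     for folder_name_lower in sorted(known_folder_names, key=len, reverse=True):
--         if folder_name_lower in query_lower:
--             return folder_name_lower
--         if folder_name_lower.count(' ') == 0 and folder_name_lower in query_tokens:
--             return folder_name_lower
--     return None
-- ===== SOURCE B (Python) =====
-- def detect_folder_from_query(query, known_folder_names):
--     query_lower = query.lower()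
--     query_tokens = [token.strip(".,?!;").lower() for token in query.split()]
--     best = None
--     for f in known_folder_names:
--         if f in query_lower or (f.count(' ') == 0 and f in query_tokens):
--             if best is None or len(f) > len(best):
--                 best = f
--     return best
-- ===== Notes on version B (the rewrite author's own statement) =====
-- stated objective: alternative
-- what changed: Replaces sort-by-length-descending-then-first-match with a single max-tracking pass over the original list (strict '>' preserves the stable sort's earliest-tie behaviour); runtime is dominated by the matching tests, so the cost is similar.
import Mathlib
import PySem

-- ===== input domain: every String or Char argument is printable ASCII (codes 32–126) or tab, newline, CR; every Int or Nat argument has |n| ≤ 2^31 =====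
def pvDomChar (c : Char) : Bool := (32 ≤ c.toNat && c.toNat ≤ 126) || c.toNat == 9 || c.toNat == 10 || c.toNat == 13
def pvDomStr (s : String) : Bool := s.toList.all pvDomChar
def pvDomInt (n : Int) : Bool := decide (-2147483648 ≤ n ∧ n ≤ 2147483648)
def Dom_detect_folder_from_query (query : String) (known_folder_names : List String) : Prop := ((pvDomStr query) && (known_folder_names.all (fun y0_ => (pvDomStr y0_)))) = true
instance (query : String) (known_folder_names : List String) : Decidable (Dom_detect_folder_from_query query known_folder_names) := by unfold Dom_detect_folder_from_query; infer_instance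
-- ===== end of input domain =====

-- B replaces A's sort-by-length-then-first-match with a single max-tracking pass over the input order (no sort; same cost in practice, matching dominates).


-- ===== PORT A =====
-- A's for-loop with its two early returns, run over the sorted list
def pvLoopA (query_lower : String) (query_tokens : List String) : List String → Option String
  | [] => none
  | f :: rest =>
    if PySem.Str.isIn f query_lower then some f
    else if PySem.Str.count f " " == 0 && query_tokens.contains f then some f
    else pvLoopA query_lower query_tokens rest

def detect_folder_from_query (query : String) (known_folder_names : List String) : Option String :=
  let query_lower := PySem.Str.lower query
  let query_tokens := (PySem.Str.split₀ query).map (fun token => PySem.Str.lower (PySem.Str.stripChars token ".,?!;"))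
  pvLoopA query_lower query_tokens (PySem.List.sorted known_folder_names (fun s => PySem.Str.len s) true)

-- ===== PORT B =====
def detect_folder_from_query_alt (query : String) (known_folder_names : List String) : Option String :=
  let query_lower := PySem.Str.lower query
  let query_tokens := (PySem.Str.split₀ query).map (fun token => PySem.Str.lower (PySem.Str.stripChars token ".,?!;"))
  known_folder_names.foldl (fun best f =>
    if PySem.Str.isIn f query_lower || (PySem.Str.count f " " == 0 && query_tokens.contains f) then
      match best with
      | none => some f
      | some b => if PySem.Str.len b < PySem.Str.len f then some f else some b
    else best) none

-- ===== PRECONDITION & SPEC =====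
def Spec_detect_folder_from_query (query : String) (known_folder_names : List String) (out : Option String) : Prop := out = detect_folder_from_query_alt query known_folder_names
instance (query : String) (known_folder_names : List String) (out : Option String) : Decidable (Spec_detect_folder_from_query query known_folder_names out) := by unfold Spec_detect_folder_from_query; infer_instance

-- ===== CLAIM (what is proved, stated in full; the proofs are below) =====
def Claim_equal_detect_folder_from_query : Prop := ∀ (query : String) (known_folder_names : List String), Dom_detect_folder_from_query query known_folder_names → Spec_detect_folder_from_query query known_folder_names (detect_folder_from_query query known_folder_names)

-- ===== LEMMAS AND PROOFS =====

-- A's loop is the first match (List.find?) of the combined predicate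
theorem pvLoopA_eq_find? (ql : String) (qt : List String) (xs : List String) :
    pvLoopA ql qt xs = xs.find? (fun f => PySem.Str.isIn f ql || (PySem.Str.count f " " == 0 && qt.contains f)) := by
  induction xs with
  | nil => rfl
  | cons f rest ih =>
    simp only [pvLoopA, List.find?]
    cases h1 : PySem.Str.isIn f ql with
    | true => simp only [Bool.true_or, if_pos]
    | false =>
      cases h2 : (PySem.Str.count f " " == 0 && qt.contains f) with
      | true => simp only [Bool.false_or, if_pos, if_neg, Bool.false_eq_true, not_false_iff]
      | false => simp only [Bool.false_or, if_neg, Bool.false_eq_true, not_false_iff, ih]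

-- B's fold step, abstracted over the predicate and key
def pvStep (p : String → Bool) (k : String → Int) (best : Option String) (f : String) : Option String :=
  if p f then
    match best with
    | none => some f
    | some b => if k b < k f then some f else some b
  else best

-- insertBy with the reverse comparator preserves "descending by key"
theorem pvInsertBy_pairwise (k : String → Int) (x : String) (acc : List String)
    (h : acc.Pairwise (fun a b => k b ≤ k a)) :
    (PySem.List.insertBy (fun a b => decide (k b < k a)) x acc).Pairwise (fun a b => k b ≤ k a) := by
  induction acc with
  | nil => simp [PySem.List.insertBy]
  | cons y t ih =>
    rcases List.pairwise_cons.mp h with ⟨hy, ht⟩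
    simp only [PySem.List.insertBy]
    by_cases hc : k y < k x
    · simp only [hc, decide_true, if_pos]
      refine List.pairwise_cons.mpr ⟨?_, h⟩
      intro z hz
      rcases List.mem_cons.mp hz with rfl | hz'
      · omega
      · have := hy z hz'; omega
    · simp only [hc, decide_false, if_neg, Bool.false_eq_true, not_false_iff]
      refine List.pairwise_cons.mpr ⟨?_, ih ht⟩
      intro z hz
      rcases (PySem.List.mem_insertBy _ _ _ _).mp hz with rfl | hz'
      · omega
      · exact hy z hz'

-- one insertion step: first match of the inserted list = B's step on the previous first match
theorem pvFind_insertBy (p : String → Bool) (k : String → Int) (x : String) (acc : List String)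
    (h : acc.Pairwise (fun a b => k b ≤ k a)) :
    (PySem.List.insertBy (fun a b => decide (k b < k a)) x acc).find? p
      = pvStep p k (acc.find? p) x := by
  induction acc with
  | nil =>
    simp only [PySem.List.insertBy, List.find?, pvStep]
    cases hp : p x <;> simp
  | cons y t ih =>
    rcases List.pairwise_cons.mp h with ⟨hy, ht⟩
    simp only [PySem.List.insertBy]
    by_cases hc : k y < k x
    · simp only [hc, decide_true, if_pos]
      cases hp : p x with
      | true =>
        simp only [List.find?, hp, pvStep]
        cases hpy : p y with
        | true => simp [hc]
        | false =>
          cases hft : t.find? p with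
          | none => simp
          | some b =>
            have hble : k b ≤ k y := hy b (List.mem_of_find?_eq_some hft)
            have hlt : k b < k x := by omega
            simp [hlt]
      | false =>
        simp [List.find?, hp, pvStep]
    · simp only [hc, decide_false, if_neg, Bool.false_eq_true, not_false_iff]
      cases hpy : p y with
      | true =>
        simp only [List.find?, hpy, pvStep]
        cases hp : p x with
        | true => simp [hc]
        | false => simp
      | false =>
        simp only [List.find?, hpy]
        exact ih ht

-- the invariant run over the whole list
theorem pvFold_invariant (p : String → Bool) (k : String → Int) (xs acc : List String)
    (h : acc.Pairwise (fun a b => k b ≤ k a)) :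
    (xs.foldl (fun a x => PySem.List.insertBy (fun a b => decide (k b < k a)) x a) acc).find? p
      = xs.foldl (pvStep p k) (acc.find? p) := by
  induction xs generalizing acc with
  | nil => rfl
  | cons x rest ih =>
    simp only [List.foldl]
    rw [ih _ (pvInsertBy_pairwise k x acc h), pvFind_insertBy p k x acc h]

-- ===== VERDICT (by name: the statement is the Claim_ definition above) =====
theorem detect_folder_from_query_spec : Claim_equal_detect_folder_from_query := by
  intro query known_folder_names _
  unfold Spec_detect_folder_from_query detect_folder_from_query detect_folder_from_query_alt
  rw [pvLoopA_eq_find?, PySem.List.sorted_rev_eq_foldl_insertBy,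
    pvFold_invariant _ (fun s => PySem.Str.len s) _ [] List.Pairwise.nil]
  rfl
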